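-- pv_equiv track=rewrite | github.com/silver7i/CarpeDiem | kingshrimp/Feb/2_week/11th/swea-1979.py | solve
-- ===== SOURCE A (Python) =====
-- def solve(N, K, matrix):
--     total = 0
--     for i in range(N):
--         cnt = 0
--         for j in range(N):
--             if matrix[i][j] == 1:
--                 cnt += 1
--             else:
--                 #  벽을 만나면 추가
--                 if cnt == K:
--                     total += 1
--                     cnt = 0
--                 else:
--                     cnt = 0
--         #  다 돌았을때도 체크해야해
--         if cnt == K:
--             total +=1
--
--     new_matrix = [list(row) for row in zip(*matrix)]
--     for i in range(N):
--         cnt = 0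
--         for j in range(N):
--             if new_matrix[i][j] == 1:
--                 cnt += 1
--             else:
--                 #  벽을 만나면 추가
--                 if cnt == K:
--                     total += 1
--                     cnt = 0
--                 else:
--                     cnt = 0
--         #  다 돌았을때도 체크해야해
--         if cnt == K:
--             total +=1
--     return total
-- ===== SOURCE B (Python) =====
-- def solve(N, K, matrix):
--     # A run of ones of length exactly K starts at j iff the K cells from j are all 1
--     # and both neighbours (or the border) are walls; count every candidate start.
--     if K <= 0:
--         return 0
--     total = 0
--     for i in range(N):
--         row = [matrix[i][j] for j in range(N)]
--         col = [matrix[j][i] for j in range(N)]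
--         for line in (row, col):
--             for j in range(N - K + 1):
--                 if all(line[t] == 1 for t in range(j, j + K)) \
--                         and (j == 0 or line[j - 1] != 1) \
--                         and (j + K == N or line[j + K] != 1):
--                     total += 1
--     return total
-- ===== Notes on version B (the rewrite author's own statement) =====
-- stated objective: alternative
-- what changed: A scans each row and column once with a running counter reset at walls plus an end-of-line check; B never maintains a counter: for every line and every candidate start position j it checks directly whether the K-cell window starting at j is all ones and bounded by walls (or the border) on both sides, counting the positions that pass.
-- intended difference: With K = 0 and 0 < N, on inputs where some row or column starts with a wall, ends with a wall or has two adjacent walls, A returns the positive count of those accidental cnt==0 hits (4 on (1, 0, [[0]])), while B returns the intended 0: there are no length-0 runs of ones. — e.g. on solve(1, 0, [[0]]): A returns 4, B returns 0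
import Mathlib
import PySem

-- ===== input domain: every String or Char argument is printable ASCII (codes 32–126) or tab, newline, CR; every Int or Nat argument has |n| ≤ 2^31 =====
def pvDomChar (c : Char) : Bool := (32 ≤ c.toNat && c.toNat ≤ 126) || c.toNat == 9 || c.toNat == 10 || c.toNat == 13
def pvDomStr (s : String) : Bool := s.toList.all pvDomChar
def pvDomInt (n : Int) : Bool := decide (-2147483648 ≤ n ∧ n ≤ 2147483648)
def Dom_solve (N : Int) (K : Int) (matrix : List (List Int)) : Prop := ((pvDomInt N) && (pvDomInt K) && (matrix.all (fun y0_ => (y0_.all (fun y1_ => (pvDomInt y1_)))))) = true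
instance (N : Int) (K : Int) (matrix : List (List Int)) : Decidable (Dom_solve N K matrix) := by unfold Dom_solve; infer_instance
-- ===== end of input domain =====

-- B replaces A's running-counter/reset/wall-check scan by a counter-free brute-force test: for every
-- line and every candidate start position j it checks directly whether the K-cell window at j is all
-- ones and bounded by walls or the border on both sides ('alternative' objective, no speed claim).

-- ===== PORT A =====
-- port of zip(*matrix): rows truncated to the shortest row; getD's default is unreachable (i < every length)
def pyZipStar (m : List (List Int)) : List (List Int) :=
  let w := ((m.map List.length).min?).getD 0
  (List.range w).map (fun i => m.map (fun r => r.getD i 0))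

-- the two passes are sequential: the column pass (over new_matrix = zip(*matrix)) starts from the
-- total the row pass produced, which is the init of the outer foldl below
def solve (N : Int) (K : Int) (matrix : List (List Int)) : Int :=
  (PySem.List.pyRange 0 N 1).foldl (fun total i =>
      let s := (PySem.List.pyRange 0 N 1).foldl
        (fun (s : Int × Int) j =>
          if PySem.List.pyGetD (PySem.List.pyGetD (pyZipStar matrix) i []) j 0 = 1 then (s.1 + 1, s.2)
          else (0, if s.1 = K then s.2 + 1 else s.2)) (0, total)
      if s.1 = K then s.2 + 1 else s.2)
    ((PySem.List.pyRange 0 N 1).foldl (fun total i =>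
      let s := (PySem.List.pyRange 0 N 1).foldl
        (fun (s : Int × Int) j =>
          if PySem.List.pyGetD (PySem.List.pyGetD matrix i []) j 0 = 1 then (s.1 + 1, s.2)
          else (0, if s.1 = K then s.2 + 1 else s.2)) (0, total)
      if s.1 = K then s.2 + 1 else s.2) 0)

-- ===== PORT B =====
-- literal transliteration of Source B: the guard K <= 0, then for i in range(N) the row and column
-- lists, and for each line and each j in range(N - K + 1) the three-part window test (all(...)
-- over range(j, j+K), the left-neighbour check, the right-neighbour check); pyGetD is exact for
-- the in-range indices Source B uses, and the `j == 0 ||` / `j + K == N ||` guards short-circuit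
-- exactly like Python's `or`
def solve_alt (N : Int) (K : Int) (matrix : List (List Int)) : Int :=
  if K ≤ 0 then 0
  else
    (PySem.List.pyRange 0 N 1).foldl (fun total i =>
      let row := (PySem.List.pyRange 0 N 1).map (fun j =>
        PySem.List.pyGetD (PySem.List.pyGetD matrix i []) j 0)
      let col := (PySem.List.pyRange 0 N 1).map (fun j =>
        PySem.List.pyGetD (PySem.List.pyGetD matrix j []) i 0)
      [row, col].foldl (fun total line =>
        (PySem.List.pyRange 0 (N - K + 1) 1).foldl (fun total j =>
          if ((PySem.List.pyRange j (j + K) 1).all (fun t => PySem.List.pyGetD line t 0 == 1)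
              && ((j == 0) || !(PySem.List.pyGetD line (j - 1) 0 == 1))
              && ((j + K == N) || !(PySem.List.pyGetD line (j + K) 0 == 1)))
          then total + 1 else total) total) total) 0

-- ===== PRECONDITION & SPEC =====
-- Pre_ excludes exactly the inputs where A raises IndexError: with 0 < N, A reads matrix[i][j]
-- (i, j < N) and column i of zip(*matrix) at rows j < N, so it needs N ≤ len(matrix) and N ≤ each
-- row's length (zip truncates columns to the shortest row).
def Pre_solve (N : Int) (K : Int) (matrix : List (List Int)) : Prop :=
  0 < N → (N ≤ (matrix.length : Int) ∧ ∀ row ∈ matrix, N ≤ (row.length : Int))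
instance (N : Int) (K : Int) (matrix : List (List Int)) : Decidable (Pre_solve N K matrix) := by
  unfold Pre_solve; infer_instance

def pvWitness_solve : Int × Int × List (List Int) := (2, 1, [[1, 0], [0, 1]])

-- entry (i, j) of the input, and row/column i of its top-left N×N block, read off by index
def pvEntry (matrix : List (List Int)) (i j : Nat) : Int := (matrix.getD i []).getD j 0

-- With K = 0 and 0 < N, on inputs where some row or column of the N×N block starts with a wall,
-- ends with a wall or has two adjacent walls, A returns the positive count of those accidental
-- "cnt == 0 at a wall / at the end" hits (e.g. 4 on (1, 0, [[0]])), while B returns the intended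
-- count of length-0 runs of ones, which is 0 — no such run exists.
def D_solve (N : Int) (K : Int) (matrix : List (List Int)) : Prop :=
  K = 0 ∧ 0 < N ∧ ∃ i < N.toNat, ∃ j ≤ N.toNat,
    ((j = N.toNat ∨ pvEntry matrix i j ≠ 1) ∧ (j = 0 ∨ pvEntry matrix i (j - 1) ≠ 1)
      ∨ (j = N.toNat ∨ pvEntry matrix j i ≠ 1) ∧ (j = 0 ∨ pvEntry matrix (j - 1) i ≠ 1))
instance (N : Int) (K : Int) (matrix : List (List Int)) : Decidable (D_solve N K matrix) := by
  unfold D_solve; infer_instance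

def Spec_solve (N : Int) (K : Int) (matrix : List (List Int)) (out : Int) : Prop :=
  ¬ D_solve N K matrix → out = solve_alt N K matrix
instance (N : Int) (K : Int) (matrix : List (List Int)) (out : Int) : Decidable (Spec_solve N K matrix out) := by
  unfold Spec_solve; infer_instance

def pvDiffWitness_solve : Int × Int × List (List Int) := (1, 0, [[0]])
def pvDiffWitnessOut_solve : Int × Int := (4, 0)

-- ===== CLAIM (what is proved, stated in full; the proofs are below) =====
def Claim_unchanged_solve : Prop := ∀ (N : Int) (K : Int) (matrix : List (List Int)), Dom_solve N K matrix → Pre_solve N K matrix → Spec_solve N K matrix (solve N K matrix)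
def Claim_changed_solve : Prop := Dom_solve (pvDiffWitness_solve.1) (pvDiffWitness_solve.2.1) (pvDiffWitness_solve.2.2) ∧ Pre_solve (pvDiffWitness_solve.1) (pvDiffWitness_solve.2.1) (pvDiffWitness_solve.2.2) ∧ D_solve (pvDiffWitness_solve.1) (pvDiffWitness_solve.2.1) (pvDiffWitness_solve.2.2) ∧ solve (pvDiffWitness_solve.1) (pvDiffWitness_solve.2.1) (pvDiffWitness_solve.2.2) = pvDiffWitnessOut_solve.1 ∧ solve_alt (pvDiffWitness_solve.1) (pvDiffWitness_solve.2.1) (pvDiffWitness_solve.2.2) = pvDiffWitnessOut_solve.2 ∧ pvDiffWitnessOut_solve.1 ≠ pvDiffWitnessOut_solve.2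

def Claim_exact_solve : Prop := ∀ (N : Int) (K : Int) (matrix : List (List Int)), Dom_solve N K matrix → Pre_solve N K matrix → D_solve N K matrix → solve N K matrix ≠ solve_alt N K matrix

-- ===== LEMMAS AND PROOFS =====

def pvLineR (matrix : List (List Int)) (N : Int) (i : Nat) : List Int :=
  (List.range N.toNat).map (fun j => pvEntry matrix i j)

def pvLineC (matrix : List (List Int)) (N : Int) (i : Nat) : List Int :=
  (List.range N.toNat).map (fun j => pvEntry matrix j i)

-- a line "bad" for K = 0: it is empty, starts with a non-1, ends with a non-1, or has two
-- adjacent non-1 entries (run = "the previous entry was part of a run of ones")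
def pvBadAux (run : Bool) (l : List Int) : Bool :=
  match l with
  | [] => !run
  | x :: xs => if x = 1 then pvBadAux true xs else if run then pvBadAux false xs else true

-- proof-side view: the 2N scanned lines as lists (rows of the sliced block, then its columns)
def pvRowsD (N : Int) (matrix : List (List Int)) : List (List Int) :=
  (matrix.take N.toNat).map (fun r => r.take N.toNat)

def pvLinesD (N : Int) (matrix : List (List Int)) : List (List Int) :=
  pvRowsD N matrix ++
    (List.range N.toNat).map (fun i => (pvRowsD N matrix).map (fun r => r.getD i 0))

-- the canonical per-line count A's scan computes: c = length of the current run of ones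
def fcnt (K : Int) : Int → List Int → Int
  | c, [] => if c = K then 1 else 0
  | c, x :: xs => if x = 1 then fcnt K (c + 1) xs else (if c = K then 1 else 0) + fcnt K 0 xs

lemma scan_eq (K : Int) : ∀ (l : List Int) (c total : Int),
    (let s := l.foldl (fun (s : Int × Int) x =>
        if x = 1 then (s.1 + 1, s.2) else (0, if s.1 = K then s.2 + 1 else s.2)) (c, total)
     if s.1 = K then s.2 + 1 else s.2) = total + fcnt K c l := by
  intro l
  induction l with
  | nil => intro c total; simp [fcnt]; split_ifs <;> ring
  | cons x xs ih =>
    intro c total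
    by_cases hx : x = 1
    · simpa [fcnt, hx] using ih (c + 1) total
    · simp only [List.foldl_cons, fcnt, if_neg hx]
      rw [ih 0 (if c = K then total + 1 else total)]
      split_ifs <;> ring

lemma inner_eq (K N : Int) (r : List Int) (hr : N ≤ (r.length : Int)) (c total : Int) :
    (PySem.List.pyRange 0 N 1).foldl (fun (s : Int × Int) j =>
        if PySem.List.pyGetD r j 0 = 1 then (s.1 + 1, s.2)
        else (0, if s.1 = K then s.2 + 1 else s.2)) (c, total)
    = (r.take N.toNat).foldl (fun (s : Int × Int) x =>
        if x = 1 then (s.1 + 1, s.2) else (0, if s.1 = K then s.2 + 1 else s.2)) (c, total) := by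
  by_cases hN : N ≤ 0
  · have h0 : N.toNat = 0 := by omega
    simp [PySem.List.pyRange_one_eq_nil hN, h0]
  · set rr := r.take N.toNat with hrr
    have hlen : (rr.length : Int) = N := by
      simp [hrr, List.length_take]; omega
    have h1 : (PySem.List.pyRange 0 N 1).foldl (fun (s : Int × Int) j =>
          if PySem.List.pyGetD r j 0 = 1 then (s.1 + 1, s.2)
          else (0, if s.1 = K then s.2 + 1 else s.2)) (c, total)
        = (PySem.List.pyRange 0 N 1).foldl (fun (s : Int × Int) j =>
          if PySem.List.pyGetD rr j 0 = 1 then (s.1 + 1, s.2)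
          else (0, if s.1 = K then s.2 + 1 else s.2)) (c, total) := by
      refine PySem.List.foldl_congr_mem _ _ _ _ (fun acc j hj => ?_)
      obtain ⟨hj0, hjN⟩ := PySem.List.mem_pyRange_one.mp hj
      obtain ⟨k, rfl⟩ := Int.eq_ofNat_of_zero_le hj0
      have hk : k < N.toNat := by omega
      have hgd : rr.getD k 0 = r.getD k 0 := by
        rw [hrr]; simp [List.getD, hk]
      simp only [PySem.List.pyGetD_natCast, hgd]
    rw [h1, ← hlen]
    exact PySem.List.foldl_pyRange_zero_pyGetD'
      (f := fun (s : Int × Int) x =>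
        if x = 1 then (s.1 + 1, s.2) else (0, if s.1 = K then s.2 + 1 else s.2))
      (d := 0) (init := (c, total)) (xs := rr)

lemma pass_eq (K N : Int) (rows : List (List Int)) (t0 : Int) (hN : 0 < N)
    (hlen : N ≤ (rows.length : Int)) (hrow : ∀ r ∈ rows, N ≤ (r.length : Int)) :
    (PySem.List.pyRange 0 N 1).foldl (fun total i =>
      let s := (PySem.List.pyRange 0 N 1).foldl
        (fun (s : Int × Int) j =>
          if PySem.List.pyGetD (PySem.List.pyGetD rows i []) j 0 = 1 then (s.1 + 1, s.2)
          else (0, if s.1 = K then s.2 + 1 else s.2)) (0, total)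
      if s.1 = K then s.2 + 1 else s.2) t0
    = t0 + ((rows.take N.toNat).map (fun r => fcnt K 0 (r.take N.toNat))).sum := by
  set n := N.toNat with hn
  set rowsn := rows.take n with hrn
  have hlen2 : (rowsn.length : Int) = N := by
    simp [hrn, List.length_take]; omega
  have h1 : (PySem.List.pyRange 0 N 1).foldl (fun total i =>
      let s := (PySem.List.pyRange 0 N 1).foldl
        (fun (s : Int × Int) j =>
          if PySem.List.pyGetD (PySem.List.pyGetD rows i []) j 0 = 1 then (s.1 + 1, s.2)
          else (0, if s.1 = K then s.2 + 1 else s.2)) (0, total)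
      if s.1 = K then s.2 + 1 else s.2) t0
      = (PySem.List.pyRange 0 N 1).foldl (fun total i =>
          total + fcnt K 0 ((PySem.List.pyGetD rowsn i []).take n)) t0 := by
    refine PySem.List.foldl_congr_mem _ _ _ _ (fun acc i hi => ?_)
    obtain ⟨hi0, hiN⟩ := PySem.List.mem_pyRange_one.mp hi
    have hirows : i < (rows.length : Int) := by omega
    have hirowsn : i < (rowsn.length : Int) := by omega
    obtain ⟨k, rfl⟩ := Int.eq_ofNat_of_zero_le hi0
    have hk : k < n := by omega
    have hrowi : PySem.List.pyGetD rows (k : Int) [] = PySem.List.pyGetD rowsn (k : Int) [] := by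
      simp only [PySem.List.pyGetD_natCast]
      rw [hrn]; simp [List.getD, hk]
    have hmem : PySem.List.pyGetD rowsn (k : Int) [] ∈ rowsn :=
      PySem.List.pyGetD_mem rowsn [] (by simp [PySem.Raise.InRange]; omega)
    have hlenrow : N ≤ ((PySem.List.pyGetD rowsn (k : Int) []).length : Int) :=
      hrow _ (List.mem_of_mem_take (hrn ▸ hmem))
    rw [hrowi, inner_eq K N _ hlenrow 0 acc, scan_eq]
  rw [h1, ← hlen2]
  rw [PySem.List.foldl_pyRange_zero_pyGetD'
    (f := fun total r => total + fcnt K 0 (r.take n)) (d := ([] : List Int)) (init := t0)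
    (xs := rowsn)]
  exact PySem.List.foldl_add _ _ _

lemma fcnt_nonneg (K : Int) : ∀ (l : List Int) (c : Int), 0 ≤ fcnt K c l := by
  intro l
  induction l with
  | nil => intro c; simp [fcnt]; split_ifs <;> omega
  | cons x xs ih =>
    intro c
    simp only [fcnt]
    split_ifs with h1 h2
    · exact ih (c + 1)
    · have := ih 0; omega
    · have := ih 0; omega

lemma fcnt_zero_iff : ∀ (l : List Int) (c : Int), 0 ≤ c →
    (fcnt 0 c l = 0 ↔ pvBadAux (decide (0 < c)) l = false) := by
  intro l
  induction l with
  | nil =>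
    intro c hc
    by_cases h : c = 0
    · simp [pvBadAux, fcnt, h]
    · simp [pvBadAux, fcnt, h]
      omega
  | cons x xs ih =>
    intro c hc
    by_cases hx : x = 1
    · have h1 : (0 : Int) < c + 1 := by omega
      simpa [fcnt, pvBadAux, hx, h1] using ih (c + 1) (by omega)
    · by_cases hc0 : c = 0
      · have hnn := fcnt_nonneg 0 xs 0
        simp [fcnt, pvBadAux, hx, hc0]
        omega
      · have hcpos : (0 : Int) < c := by omega
        simpa [fcnt, pvBadAux, hx, hc0, hcpos] using ih 0 le_rfl

lemma fcnt_neg (K : Int) (hK : K < 0) : ∀ (l : List Int) (c : Int), 0 ≤ c → fcnt K c l = 0 := by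
  intro l
  induction l with
  | nil => intro c hc; simp [fcnt]; omega
  | cons x xs ih =>
    intro c hc
    by_cases hx : x = 1
    · simp [fcnt, hx]; exact ih (c + 1) (by omega)
    · simp [fcnt, hx, ih 0 le_rfl]
      intro h; omega

lemma rowsD_eq (N : Int) (matrix : List (List Int))
    (hlen : N ≤ (matrix.length : Int)) (hrow : ∀ r ∈ matrix, N ≤ (r.length : Int)) :
    pvRowsD N matrix = (List.range N.toNat).map (pvLineR matrix N) := by
  have hn : N.toNat ≤ matrix.length := by omega
  apply List.ext_getElem
  · simp [pvRowsD, pvLineR]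
    omega
  · intro i h1 h2
    simp only [pvRowsD, List.getElem_map, List.getElem_take, List.getElem_range]
    have hi : i < N.toNat := by simpa using h2
    have him : i < matrix.length := by omega
    have hrl : N.toNat ≤ matrix[i].length := by
      have := hrow matrix[i] (List.getElem_mem him)
      omega
    apply List.ext_getElem
    · simp [pvLineR]
      omega
    · intro j hj1 hj2
      have hj : j < N.toNat := by simp [List.length_take] at hj1; omega
      simp only [pvLineR, List.getElem_take, List.getElem_map, List.getElem_range, pvEntry]
      rw [List.getD_eq_getElem _ _ him, List.getD_eq_getElem _ _ (by omega : j < matrix[i].length)]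

lemma linesD_eq (N : Int) (matrix : List (List Int))
    (hlen : N ≤ (matrix.length : Int)) (hrow : ∀ r ∈ matrix, N ≤ (r.length : Int)) :
    pvLinesD N matrix
      = (List.range N.toNat).map (pvLineR matrix N)
        ++ (List.range N.toNat).map (pvLineC matrix N) := by
  unfold pvLinesD
  rw [rowsD_eq N matrix hlen hrow]
  congr 1
  apply List.map_congr_left
  intro i hi
  have hin : i < N.toNat := List.mem_range.mp hi
  rw [List.map_map]
  apply List.map_congr_left
  intro j hj
  have hjn : j < N.toNat := List.mem_range.mp hj
  show (pvLineR matrix N j).getD i 0 = pvEntry matrix j i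
  unfold pvLineR
  rw [List.getD_eq_getElem _ _ (by simpa using hin)]
  simp

lemma bad_iff (N : Int) (matrix : List (List Int))
    (hlen : N ≤ (matrix.length : Int)) (hrow : ∀ r ∈ matrix, N ≤ (r.length : Int)) :
    ((pvLinesD N matrix).any (fun l => pvBadAux false l) = true)
      ↔ ((List.range N.toNat).any (fun i =>
          pvBadAux false (pvLineR matrix N i) || pvBadAux false (pvLineC matrix N i)) = true) := by
  rw [linesD_eq N matrix hlen hrow]
  simp [List.any_append, List.any_map, List.any_eq_true, Function.comp]
  constructor
  · rintro (⟨x, hx, h⟩ | ⟨x, hx, h⟩)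
    · exact ⟨x, hx, Or.inl h⟩
    · exact ⟨x, hx, Or.inr h⟩
  · rintro ⟨x, hx, h | h⟩
    · exact Or.inl ⟨x, hx, h⟩
    · exact Or.inr ⟨x, hx, h⟩

lemma badAux_iff : ∀ (l : List Int) (run : Bool),
    pvBadAux run l = true ↔ ∃ j, j ≤ l.length ∧ (j = l.length ∨ l.getD j 0 ≠ 1) ∧
      (if j = 0 then run = false else l.getD (j - 1) 0 ≠ 1) := by
  intro l
  induction l with
  | nil =>
    intro run
    cases run with
    | false =>
      constructor
      · intro _
        exact ⟨0, le_rfl, Or.inl rfl, by simp⟩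
      · intro _
        simp [pvBadAux]
    | true =>
      constructor
      · intro h
        simp [pvBadAux] at h
      · rintro ⟨j, hj, -, hleft⟩
        have hj0 : j = 0 := by simp only [List.length_nil] at hj; omega
        rw [hj0] at hleft
        simp at hleft
  | cons x xs ih =>
    intro run
    by_cases hx : x = 1
    · subst hx
      have hstep : pvBadAux run ((1 : Int) :: xs) = pvBadAux true xs := by simp [pvBadAux]
      rw [hstep, ih true]
      constructor
      · rintro ⟨j, hj, hend, hleft⟩
        refine ⟨j + 1, by simp only [List.length_cons]; omega, ?_, ?_⟩
        · rcases hend with h | h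
          · exact Or.inl (by simp [h])
          · exact Or.inr (by simpa using h)
        · have hj0 : j ≠ 0 := by
            intro h0; rw [h0] at hleft; simp at hleft
        -- hleft : xs.getD (j - 1) 0 ≠ 1
          rw [if_neg hj0] at hleft
          rw [if_neg (Nat.succ_ne_zero j)]
          have he : (j + 1) - 1 = j := by omega
          rw [he]
          obtain ⟨m, rfl⟩ := Nat.exists_eq_succ_of_ne_zero hj0
          simpa using hleft
      · rintro ⟨j, hj, hend, hleft⟩
        cases j with
        | zero =>
          exfalso
          rcases hend with h | h
          · simp at h
          · simp at h
        | succ m =>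
          rw [if_neg (Nat.succ_ne_zero m)] at hleft
          have he : (m + 1) - 1 = m := by omega
          rw [he] at hleft
          have hm0 : m ≠ 0 := by
            intro h0; rw [h0] at hleft; simp at hleft
          refine ⟨m, by simp only [List.length_cons] at hj; omega, ?_, ?_⟩
          · rcases hend with h | h
            · exact Or.inl (by simp only [List.length_cons] at h; omega)
            · exact Or.inr (by simpa using h)
          · rw [if_neg hm0]
            obtain ⟨p, rfl⟩ := Nat.exists_eq_succ_of_ne_zero hm0
            simpa using hleft
    · have hstep : pvBadAux run (x :: xs) = (if run then pvBadAux false xs else true) := by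
        simp [pvBadAux, hx]
      rw [hstep]
      cases run with
      | false =>
        constructor
        · intro _
          exact ⟨0, Nat.zero_le _, Or.inr (by simpa using hx), by simp⟩
        · intro _
          simp
      | true =>
        rw [if_pos rfl, ih false]
        constructor
        · rintro ⟨j, hj, hend, hleft⟩
          refine ⟨j + 1, by simp only [List.length_cons]; omega, ?_, ?_⟩
          · rcases hend with h | h
            · exact Or.inl (by simp [h])
            · exact Or.inr (by simpa using h)
          · rw [if_neg (Nat.succ_ne_zero j)]
            have he : (j + 1) - 1 = j := by omega
            rw [he]
            cases j with
            | zero => simpa using hx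
            | succ p =>
              rw [if_neg (Nat.succ_ne_zero p)] at hleft
              simpa using hleft
        · rintro ⟨j, hj, hend, hleft⟩
          cases j with
          | zero => simp at hleft
          | succ m =>
            rw [if_neg (Nat.succ_ne_zero m)] at hleft
            have he : (m + 1) - 1 = m := by omega
            rw [he] at hleft
            refine ⟨m, by simp only [List.length_cons] at hj; omega, ?_, ?_⟩
            · rcases hend with h | h
              · exact Or.inl (by simp only [List.length_cons] at h; omega)
              · exact Or.inr (by simpa using h)
            · cases m with
              | zero => simp
              | succ p =>
                rw [if_neg (Nat.succ_ne_zero p)]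
                simpa using hleft

lemma mapBad_iff (n : Nat) (e : Nat → Int) :
    pvBadAux false ((List.range n).map e) = true
      ↔ ∃ j, j ≤ n ∧ (j = n ∨ e j ≠ 1) ∧ (j = 0 ∨ e (j - 1) ≠ 1) := by
  rw [badAux_iff]
  constructor
  · rintro ⟨j, hj, hend, hleft⟩
    simp only [List.length_map, List.length_range] at hj hend
    refine ⟨j, hj, ?_, ?_⟩
    · rcases hend with h | h
      · exact Or.inl h
      · by_cases hjn : j = n
        · exact Or.inl hjn
        · refine Or.inr ?_
          rwa [PySem.List.getD_map_range e n j 0 (by omega)] at h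
    · by_cases hj0 : j = 0
      · exact Or.inl hj0
      · rw [if_neg hj0] at hleft
        refine Or.inr ?_
        rwa [PySem.List.getD_map_range e n (j - 1) 0 (by omega)] at hleft
  · rintro ⟨j, hj, hend, hleft⟩
    refine ⟨j, by simpa using hj, ?_, ?_⟩
    · rcases hend with h | h
      · exact Or.inl (by simpa using h)
      · by_cases hjn : j = n
        · exact Or.inl (by simpa using hjn)
        · exact Or.inr (by rwa [PySem.List.getD_map_range e n j 0 (by omega)])
    · by_cases hj0 : j = 0
      · rw [hj0]
        simp
      · rw [if_neg hj0]
        rcases hleft with h | h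
        · exact absurd h hj0
        · rwa [PySem.List.getD_map_range e n (j - 1) 0 (by omega)]

-- the compact D_ condition is exactly "some row or column of the block is bad"
lemma D3_iff (N : Int) (matrix : List (List Int)) :
    ((List.range N.toNat).any (fun i =>
        pvBadAux false (pvLineR matrix N i) || pvBadAux false (pvLineC matrix N i)) = true)
      ↔ ∃ i < N.toNat, ∃ j ≤ N.toNat,
        ((j = N.toNat ∨ pvEntry matrix i j ≠ 1) ∧ (j = 0 ∨ pvEntry matrix i (j - 1) ≠ 1)
          ∨ (j = N.toNat ∨ pvEntry matrix j i ≠ 1) ∧ (j = 0 ∨ pvEntry matrix (j - 1) i ≠ 1)) := by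
  simp only [List.any_eq_true, List.mem_range, Bool.or_eq_true]
  constructor
  · rintro ⟨i, hi, h | h⟩
    · obtain ⟨j, hj, hend, hleft⟩ := (mapBad_iff N.toNat (fun j => pvEntry matrix i j)).mp h
      exact ⟨i, hi, j, hj, Or.inl ⟨hend, hleft⟩⟩
    · obtain ⟨j, hj, hend, hleft⟩ := (mapBad_iff N.toNat (fun j => pvEntry matrix j i)).mp h
      exact ⟨i, hi, j, hj, Or.inr ⟨hend, hleft⟩⟩
  · rintro ⟨i, hi, j, hj, h | h⟩
    · exact ⟨i, hi, Or.inl ((mapBad_iff N.toNat (fun j => pvEntry matrix i j)).mpr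
        ⟨j, hj, h.1, h.2⟩)⟩
    · exact ⟨i, hi, Or.inr ((mapBad_iff N.toNat (fun j => pvEntry matrix j i)).mpr
        ⟨j, hj, h.1, h.2⟩)⟩

-- A as a sum of per-line canonical counts over the 2N lines of the block
lemma solve_sum (N K : Int) (matrix : List (List Int)) (hN' : 0 < N)
    (hlen : N ≤ (matrix.length : Int)) (hrow : ∀ r ∈ matrix, N ≤ (r.length : Int)) :
    solve N K matrix = ((pvLinesD N matrix).map (fun l => fcnt K 0 l)).sum := by
  have hmat_ne : matrix ≠ [] := by
    intro h; rw [h] at hlen; simp at hlen; omega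
  obtain ⟨a, ha⟩ : ∃ a, (matrix.map List.length).min? = some a := by
    cases h : (matrix.map List.length).min? with
    | some a => exact ⟨a, rfl⟩
    | none =>
      rw [List.min?_eq_none_iff] at h
      simp at h
      exact absurd h hmat_ne
  have hNa : N ≤ (a : Int) := by
    obtain ⟨hamem, -⟩ := List.min?_eq_some_iff.mp ha
    obtain ⟨r, hrmem, rfl⟩ := List.mem_map.mp hamem
    exact hrow r hrmem
  have hzip : pyZipStar matrix
      = (List.range a).map (fun i => matrix.map (fun r => r.getD i 0)) := by
    simp [pyZipStar, ha]
  have hzlen : N ≤ ((pyZipStar matrix).length : Int) := by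
    rw [hzip]; simp; omega
  have hzrow : ∀ r ∈ pyZipStar matrix, N ≤ (r.length : Int) := by
    intro r hr
    rw [hzip] at hr
    obtain ⟨i, -, rfl⟩ := List.mem_map.mp hr
    simpa using hlen
  have htake : (pyZipStar matrix).take N.toNat
      = (List.range N.toNat).map (fun i => matrix.map (fun r => r.getD i 0)) := by
    rw [hzip, ← List.map_take, List.take_range, min_eq_left (by omega : N.toNat ≤ a)]
  unfold solve
  rw [pass_eq K N matrix 0 hN' hlen hrow,
      pass_eq K N (pyZipStar matrix) _ hN' hzlen hzrow]
  unfold pvLinesD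
  rw [List.map_append, List.sum_append]
  have e1 : (pvRowsD N matrix).map (fun l => fcnt K 0 l)
      = (matrix.take N.toNat).map (fun r => fcnt K 0 (r.take N.toNat)) := by
    unfold pvRowsD
    rw [List.map_map]
    rfl
  have e2 : ((List.range N.toNat).map (fun i =>
        (pvRowsD N matrix).map (fun r => r.getD i 0))).map (fun l => fcnt K 0 l)
      = ((pyZipStar matrix).take N.toNat).map (fun r => fcnt K 0 (r.take N.toNat)) := by
    rw [htake, List.map_map, List.map_map]
    apply List.map_congr_left
    intro i hi
    have hin : i < N.toNat := List.mem_range.mp hi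
    simp only [Function.comp]
    congr 1
    rw [← List.map_take]
    unfold pvRowsD
    rw [List.map_map]
    apply List.map_congr_left
    intro r hr
    have hrlen := hrow r (List.mem_of_mem_take hr)
    simp [Function.comp, List.getD, hin]
  rw [e1, e2]
  ring

-- ===== B-side lemmas: the window test counts exactly the maximal runs of length K =====

-- length of the leading run of ones
def leadLen (l : List Int) : Nat := (l.takeWhile (fun y => y == 1)).length

-- the window test at start position j of line l, with prev = "the virtual element before l is a 1"
def wOK (k : Nat) (l : List Int) (prev : Bool) (j : Nat) : Bool :=
  ((List.range k).all (fun s => l.getD (j + s) 0 == 1))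
    && (if j = 0 then !prev else !(l.getD (j - 1) 0 == 1))
    && !(l.getD (j + k) 0 == 1)

-- B's per-line count, over the candidate start positions
def Icount (k : Nat) (prev : Bool) (l : List Int) : Nat :=
  (List.range (l.length + 1 - k)).countP (wOK k l prev)

lemma leadLen_cons_one (xs : List Int) : leadLen (1 :: xs) = leadLen xs + 1 := by
  simp [leadLen, List.takeWhile_cons]

lemma leadLen_cons_ne (x : Int) (xs : List Int) (hx : x ≠ 1) : leadLen (x :: xs) = 0 := by
  simp [leadLen, List.takeWhile_cons, hx]

lemma wOK_succ (k : Nat) (x : Int) (xs : List Int) (prev : Bool) (j : Nat) :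
    wOK k (x :: xs) prev (j + 1) = wOK k xs (x == 1) j := by
  unfold wOK
  have hw : (fun s => (x :: xs).getD (j + 1 + s) 0 == 1) = (fun s => xs.getD (j + s) 0 == 1) := by
    funext s
    rw [show j + 1 + s = (j + s) + 1 by omega, List.getD_cons_succ]
  have hr : (x :: xs).getD (j + 1 + k) 0 = xs.getD (j + k) 0 := by
    rw [show j + 1 + k = (j + k) + 1 by omega, List.getD_cons_succ]
  rw [hw, hr]
  cases j with
  | zero => simp [List.getD_cons_zero]
  | succ m => simp [List.getD_cons_succ]

lemma wOK_zero_true (k : Nat) (l : List Int) : wOK k l true 0 = false := by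
  simp [wOK]

lemma Icount_cons (k : Nat) (x : Int) (xs : List Int) (prev : Bool) :
    Icount k prev (x :: xs)
      = (if wOK k (x :: xs) prev 0 then 1 else 0) + Icount k (x == 1) xs := by
  unfold Icount
  by_cases hlen : k ≤ xs.length + 1
  · have hm : (x :: xs).length + 1 - k = (xs.length + 1 - k) + 1 := by
      simp; omega
    rw [hm, List.range_succ_eq_map, List.countP_cons, List.countP_map]
    have hc : (wOK k (x :: xs) prev) ∘ Nat.succ = wOK k xs (x == 1) := by
      funext j
      exact wOK_succ k x xs prev j
    rw [hc, Nat.add_comm]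
  · have h1 : (x :: xs).length + 1 - k = 0 := by simp; omega
    have h2 : xs.length + 1 - k = 0 := by omega
    have hall : ((List.range k).all (fun s => (x :: xs).getD (0 + s) 0 == 1)) = false := by
      refine List.all_eq_false.mpr ⟨xs.length + 1, List.mem_range.mpr (by omega), ?_⟩
      have hd : (x :: xs).getD (0 + (xs.length + 1)) 0 = 0 := by
        apply List.getD_eq_default
        simp
      simp [hd]
    have h0 : wOK k (x :: xs) prev 0 = false := by
      unfold wOK
      rw [hall]
      simp
    rw [h1, h2, h0]
    simp

lemma wOK_zero_false : ∀ (l : List Int) (k : Nat), wOK k l false 0 = true ↔ leadLen l = k := by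
  intro l
  induction l with
  | nil =>
    intro k
    cases k with
    | zero => simp [wOK, leadLen]
    | succ m =>
      constructor
      · intro h
        exfalso
        unfold wOK at h
        have : ((List.range (m + 1)).all (fun s => ([] : List Int).getD (0 + s) 0 == 1)) = true := by
          simp only [Bool.and_eq_true] at h
          exact h.1.1
        have h0 := List.all_eq_true.mp this 0 (List.mem_range.mpr (by omega))
        simp [List.getD] at h0
      · intro h
        simp [leadLen] at h
  | cons x xs ih =>
    intro k
    by_cases hx : x = 1
    · subst hx
      cases k with
      | zero =>
        constructor
        · intro h
          exfalso
          unfold wOK at h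
          simp [List.getD_cons_zero] at h
        · intro h
          rw [leadLen_cons_one] at h
          omega
      | succ m =>
        have hstep : wOK (m + 1) ((1 : Int) :: xs) false 0 = wOK m xs false 0 := by
          unfold wOK
          have hall : ((List.range (m + 1)).all (fun s => ((1 : Int) :: xs).getD (0 + s) 0 == 1))
              = ((List.range m).all (fun s => xs.getD (0 + s) 0 == 1)) := by
            rw [List.range_succ_eq_map, List.all_cons, List.all_map]
            have : (fun s => ((1 : Int) :: xs).getD (0 + s) 0 == 1) ∘ Nat.succ
                = (fun s => xs.getD (0 + s) 0 == 1) := by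
              funext s
              simp only [Function.comp]
              rw [show 0 + Nat.succ s = (0 + s) + 1 by omega, List.getD_cons_succ]
            rw [this]
            simp [List.getD_cons_zero]
          have hrt : ((1 : Int) :: xs).getD (0 + (m + 1)) 0 = xs.getD (0 + m) 0 := by
            rw [show 0 + (m + 1) = (0 + m) + 1 by omega, List.getD_cons_succ]
          rw [hall, hrt]
          simp
        rw [hstep, ih m, leadLen_cons_one]
        omega
    · have h0 : leadLen (x :: xs) = 0 := leadLen_cons_ne x xs hx
      cases k with
      | zero =>
        constructor
        · intro _; exact h0
        · intro _
          unfold wOK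
          simp [List.getD_cons_zero, hx]
      | succ m =>
        constructor
        · intro h
          exfalso
          unfold wOK at h
          simp only [Bool.and_eq_true] at h
          have := List.all_eq_true.mp h.1.1 0 (List.mem_range.mpr (by omega))
          simp [List.getD_cons_zero, hx] at this
        · intro h
          rw [h0] at h
          omega

-- combined induction: B's position count equals A's canonical run count (K ≥ 1)
lemma Icount_fcnt (K : Int) (hK : 1 ≤ K) : ∀ (l : List Int),
    ((Icount K.toNat false l : Int) = fcnt K 0 l) ∧
    (∀ c : Int, 1 ≤ c →
      fcnt K c l = (if c + (leadLen l : Int) = K then 1 else 0) + (Icount K.toNat true l : Int)) := by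
  have hKk : ((K.toNat : Int)) = K := Int.toNat_of_nonneg (by omega)
  have hk1 : 1 ≤ K.toNat := by omega
  intro l
  induction l with
  | nil =>
    have hI : ∀ prev, Icount K.toNat prev [] = 0 := by
      intro prev
      unfold Icount
      have : (([] : List Int).length + 1 - K.toNat) = 0 := by simp; omega
      rw [this]
      rfl
    constructor
    · rw [hI]
      simp [fcnt]
      omega
    · intro c hc
      rw [hI]
      simp [fcnt, leadLen]
  | cons x xs ih =>
    obtain ⟨ihP, ihG⟩ := ih
    by_cases hx : x = 1
    · subst hx
      have hxe : ((1 : Int) == 1) = true := by decide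
      constructor
      · rw [Icount_cons, hxe]
        have hf : fcnt K 0 ((1 : Int) :: xs) = fcnt K 1 xs := by simp [fcnt]
        rw [hf, ihG 1 le_rfl]
        push_cast
        congr 1
        by_cases hc : leadLen xs + 1 = K.toNat
        · have h1 : wOK K.toNat ((1 : Int) :: xs) false 0 = true := by
            rw [wOK_zero_false, leadLen_cons_one]; exact hc
          have h2 : (1 : Int) + (leadLen xs : Int) = K := by omega
          simp [h1, h2]
        · have h1 : wOK K.toNat ((1 : Int) :: xs) false 0 = false := by
            rw [Bool.eq_false_iff]
            intro hcontra
            exact hc (by rw [← leadLen_cons_one]; exact (wOK_zero_false _ _).mp hcontra)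
          have h2 : ¬ ((1 : Int) + (leadLen xs : Int) = K) := by omega
          simp [h1, h2]
      · intro c hc
        have hf : fcnt K c ((1 : Int) :: xs) = fcnt K (c + 1) xs := by simp [fcnt]
        rw [hf, ihG (c + 1) (by omega), Icount_cons, hxe, wOK_zero_true, leadLen_cons_one]
        push_cast
        have hcond : (c + 1 + (leadLen xs : Int) = K) ↔ (c + ((leadLen xs : Int) + 1) = K) := by
          omega
        by_cases h : c + 1 + (leadLen xs : Int) = K
        · simp [h, hcond.mp h]
        · simp [h]
          omega
    · have hxe : (x == 1) = false := by simp [hx]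
      have hw0 : ∀ prev, wOK K.toNat (x :: xs) prev 0 = false := by
        intro prev
        rw [Bool.eq_false_iff]
        intro hcontra
        unfold wOK at hcontra
        simp only [Bool.and_eq_true] at hcontra
        have := List.all_eq_true.mp hcontra.1.1 0 (List.mem_range.mpr (by omega))
        simp [List.getD_cons_zero, hx] at this
      constructor
      · have hf : fcnt K 0 (x :: xs) = fcnt K 0 xs := by
          simp [fcnt, hx]
          intro h; omega
        rw [Icount_cons, hxe, hw0, hf]
        push_cast
        simp [ihP]
      · intro c hc
        have hf : fcnt K c (x :: xs) = (if c = K then 1 else 0) + fcnt K 0 xs := by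
          simp [fcnt, hx]
        rw [hf, ← ihP, Icount_cons, hxe, hw0, leadLen_cons_ne x xs hx]
        push_cast
        simp

-- bridge: B's inner j-loop over one line equals the Icount of that line
lemma inner_window_eq (K N : Int) (hK : 1 ≤ K) (line : List Int)
    (hlen : (line.length : Int) = N) (total : Int) :
    (PySem.List.pyRange 0 (N - K + 1) 1).foldl (fun total j =>
      if ((PySem.List.pyRange j (j + K) 1).all (fun t => PySem.List.pyGetD line t 0 == 1)
          && ((j == 0) || !(PySem.List.pyGetD line (j - 1) 0 == 1))
          && ((j + K == N) || !(PySem.List.pyGetD line (j + K) 0 == 1)))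
      then total + 1 else total) total
    = total + (Icount K.toNat false line : Int) := by
  have hKk : ((K.toNat : Int)) = K := Int.toNat_of_nonneg (by omega)
  rw [PySem.List.pyRange_one, List.foldl_map]
  have hm : (N - K + 1 - 0).toNat = line.length + 1 - K.toNat := by omega
  rw [hm]
  rw [PySem.List.foldl_count_if (fun j : Nat =>
    ((PySem.List.pyRange ((0 : Int) + j) (((0 : Int) + j) + K) 1).all
        (fun t => PySem.List.pyGetD line t 0 == 1)
      && ((((0 : Int) + j) == 0) || !(PySem.List.pyGetD line (((0 : Int) + j) - 1) 0 == 1))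
      && ((((0 : Int) + j) + K == N) || !(PySem.List.pyGetD line (((0 : Int) + j) + K) 0 == 1))))]
  congr 2
  apply List.countP_congr
  intro j hj
  have hjlt : j < line.length + 1 - K.toNat := List.mem_range.mp hj
  have hjk : j + K.toNat ≤ line.length := by omega
  have hz : ((0 : Int) + (j : Int)) = (j : Int) := by ring
  rw [hz]
  have hwin : ((PySem.List.pyRange (j : Int) ((j : Int) + K) 1).all
      (fun t => PySem.List.pyGetD line t 0 == 1))
      = ((List.range K.toNat).all (fun s => line.getD (j + s) 0 == 1)) := by
    rw [PySem.List.pyRange_one, List.all_map]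
    have he : ((j : Int) + K - (j : Int)).toNat = K.toNat := by omega
    rw [he]
    congr 1
    funext s
    simp only [Function.comp_apply]
    have hcast : ((j : Int) + (s : Int)) = ((j + s : Nat) : Int) := by push_cast; ring
    rw [hcast, PySem.List.pyGetD_natCast]
  have hleft : (((j : Int) == 0) || !(PySem.List.pyGetD line ((j : Int) - 1) 0 == 1))
      = (if j = 0 then !false else !(line.getD (j - 1) 0 == 1)) := by
    cases j with
    | zero => simp
    | succ m =>
      have hne : (((m + 1 : Nat) : Int) == 0) = false := by
        simp only [beq_eq_false_iff_ne, ne_eq]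
        omega
      have hidx : ((m + 1 : Nat) : Int) - 1 = ((m : Nat) : Int) := by push_cast; ring
      rw [hne, hidx]
      simp [PySem.List.pyGetD_natCast]
  have hright : (((j : Int) + K == N) || !(PySem.List.pyGetD line ((j : Int) + K) 0 == 1))
      = !(line.getD (j + K.toNat) 0 == 1) := by
    have hidx : ((j : Int) + K) = ((j + K.toNat : Nat) : Int) := by push_cast; omega
    rw [hidx]
    by_cases he : j + K.toNat = line.length
    · have h1 : (((j + K.toNat : Nat) : Int) == N) = true := by
        simp only [beq_iff_eq]
        omega
      have h2 : line.getD (j + K.toNat) 0 = 0 := by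
        apply List.getD_eq_default
        omega
      rw [h1, h2]
      simp
    · have h1 : (((j + K.toNat : Nat) : Int) == N) = false := by
        simp only [beq_eq_false_iff_ne, ne_eq]
        omega
      rw [h1, PySem.List.pyGetD_natCast]
      simp
  rw [hwin, hleft, hright]
  rfl

-- B as the same sum of per-line canonical counts (K ≥ 1)
lemma alt_sum (N K : Int) (matrix : List (List Int)) (hN : 0 < N) (hK : 1 ≤ K) :
    solve_alt N K matrix
      = ((List.range N.toNat).map (fun i => fcnt K 0 (pvLineR matrix N i))).sum
        + ((List.range N.toNat).map (fun i => fcnt K 0 (pvLineC matrix N i))).sum := by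
  unfold solve_alt
  rw [if_neg (by omega)]
  have hrowc : ∀ i : Int, 0 ≤ i →
      ((PySem.List.pyRange 0 N 1).map (fun j =>
        PySem.List.pyGetD (PySem.List.pyGetD matrix i []) j 0)) = pvLineR matrix N i.toNat := by
    intro i hi
    rw [PySem.List.pyRange_one]
    unfold pvLineR
    rw [List.map_map]
    have he : (N - 0).toNat = N.toNat := by omega
    rw [he]
    apply List.map_congr_left
    intro j _
    simp only [Function.comp, pvEntry]
    have h0 : ((0 : Int) + (j : Int)) = ((j : Nat) : Int) := by ring
    rw [h0, PySem.List.pyGetD_of_nonneg matrix [] hi, PySem.List.pyGetD_natCast]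
  have hcolc : ∀ i : Int, 0 ≤ i →
      ((PySem.List.pyRange 0 N 1).map (fun j =>
        PySem.List.pyGetD (PySem.List.pyGetD matrix j []) i 0)) = pvLineC matrix N i.toNat := by
    intro i hi
    rw [PySem.List.pyRange_one]
    unfold pvLineC
    rw [List.map_map]
    have he : (N - 0).toNat = N.toNat := by omega
    rw [he]
    apply List.map_congr_left
    intro j _
    simp only [Function.comp, pvEntry]
    have h0 : ((0 : Int) + (j : Int)) = ((j : Nat) : Int) := by ring
    rw [h0, PySem.List.pyGetD_natCast, PySem.List.pyGetD_of_nonneg _ _ hi]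
  have hbody : (PySem.List.pyRange 0 N 1).foldl (fun total i =>
      let row := (PySem.List.pyRange 0 N 1).map (fun j =>
        PySem.List.pyGetD (PySem.List.pyGetD matrix i []) j 0)
      let col := (PySem.List.pyRange 0 N 1).map (fun j =>
        PySem.List.pyGetD (PySem.List.pyGetD matrix j []) i 0)
      [row, col].foldl (fun total line =>
        (PySem.List.pyRange 0 (N - K + 1) 1).foldl (fun total j =>
          if ((PySem.List.pyRange j (j + K) 1).all (fun t => PySem.List.pyGetD line t 0 == 1)
              && ((j == 0) || !(PySem.List.pyGetD line (j - 1) 0 == 1))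
              && ((j + K == N) || !(PySem.List.pyGetD line (j + K) 0 == 1)))
          then total + 1 else total) total) total) 0
      = (PySem.List.pyRange 0 N 1).foldl (fun total i =>
          total + (fcnt K 0 (pvLineR matrix N i.toNat) + fcnt K 0 (pvLineC matrix N i.toNat))) 0 := by
    refine PySem.List.foldl_congr_mem _ _ _ _ (fun acc i hi => ?_)
    obtain ⟨hi0, hiN⟩ := PySem.List.mem_pyRange_one.mp hi
    simp only [hrowc i hi0, hcolc i hi0, List.foldl_cons, List.foldl_nil]
    have hlenR : ((pvLineR matrix N i.toNat).length : Int) = N := by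
      simp [pvLineR]; omega
    have hlenC : ((pvLineC matrix N i.toNat).length : Int) = N := by
      simp [pvLineC]; omega
    rw [inner_window_eq K N hK _ hlenR _, inner_window_eq K N hK _ hlenC _]
    have hfR := (Icount_fcnt K hK (pvLineR matrix N i.toNat)).1
    have hfC := (Icount_fcnt K hK (pvLineC matrix N i.toNat)).1
    rw [hfR, hfC]
    ring
  rw [hbody, PySem.List.pyRange_one]
  rw [List.foldl_map]
  have he : (N - 0).toNat = N.toNat := by omega
  rw [he]
  have : (List.range N.toNat).foldl (fun total (j : Nat) =>
      total + (fcnt K 0 (pvLineR matrix N (((0 : Int) + (j : Int)).toNat))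
        + fcnt K 0 (pvLineC matrix N (((0 : Int) + (j : Int)).toNat)))) 0
      = (List.range N.toNat).foldl (fun total j =>
      total + (fcnt K 0 (pvLineR matrix N j) + fcnt K 0 (pvLineC matrix N j))) 0 := by
    refine PySem.List.foldl_congr_mem _ _ _ _ (fun acc j _ => ?_)
    have : (((0 : Int) + (j : Int)).toNat) = j := by omega
    rw [this]
  rw [this, PySem.List.foldl_add]
  rw [PySem.List.sum_map_add_int]
  ring

lemma sum_pos_of_mem {l : List Int} {x : Int} (hx : x ∈ l) (hpos : 0 < x)
    (hnn : ∀ y ∈ l, 0 ≤ y) : 0 < l.sum := by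
  obtain ⟨s, t, rfl⟩ := List.append_of_mem hx
  rw [List.sum_append, List.sum_cons]
  have h1 : 0 ≤ s.sum := List.sum_nonneg (fun y hy => hnn y (by simp [hy]))
  have h2 : 0 ≤ t.sum := List.sum_nonneg (fun y hy => hnn y (by simp [hy]))
  omega

theorem solve_spec : Claim_unchanged_solve := by
  intro N K matrix _ hPre hD
  by_cases hN : N ≤ 0
  · by_cases hKle : K ≤ 0 <;>
      simp [solve, solve_alt, PySem.List.pyRange_one_eq_nil hN, hKle]
  · have hN' : 0 < N := by omega
    obtain ⟨hlen, hrow⟩ := hPre hN'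
    by_cases hK1 : 1 ≤ K
    · rw [solve_sum N K matrix hN' hlen hrow, alt_sum N K matrix hN' hK1,
          linesD_eq N matrix hlen hrow, List.map_append, List.sum_append,
          List.map_map, List.map_map]
      rfl
    · have hB : solve_alt N K matrix = 0 := by
        unfold solve_alt
        rw [if_pos (by omega)]
      rw [hB, solve_sum N K matrix hN' hlen hrow]
      by_cases hK0 : K = 0
      · subst hK0
        unfold D_solve at hD
        have hall : ∀ l ∈ pvLinesD N matrix, pvBadAux false l = false := by
          intro l hl
          by_contra h
          exact hD ⟨rfl, hN', (D3_iff N matrix).mp ((bad_iff N matrix hlen hrow).mp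
            (List.any_eq_true.mpr ⟨l, hl, by simpa using h⟩))⟩
        rw [List.sum_eq_zero]
        intro x hx
        obtain ⟨l, hl, rfl⟩ := List.mem_map.mp hx
        exact (fcnt_zero_iff l 0 le_rfl).mpr (by simpa using hall l hl)
      · have hKneg : K < 0 := by omega
        rw [List.sum_eq_zero]
        intro x hx
        obtain ⟨l, hl, rfl⟩ := List.mem_map.mp hx
        exact fcnt_neg K hKneg l 0 le_rfl

theorem solve_changed : Claim_changed_solve := by
  unfold Claim_changed_solve; decide

theorem solve_tight : Claim_exact_solve := by
  intro N K matrix _ hPre hD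
  obtain ⟨hK0, hN', hbad⟩ := hD
  obtain ⟨hlen, hrow⟩ := hPre hN'
  subst hK0
  have hB : solve_alt N 0 matrix = 0 := by
    unfold solve_alt
    rw [if_pos le_rfl]
  rw [hB, solve_sum N 0 matrix hN' hlen hrow]
  obtain ⟨l, hl, hbadl⟩ := List.any_eq_true.mp
    ((bad_iff N matrix hlen hrow).mpr ((D3_iff N matrix).mpr hbad))
  have hpos : 0 < fcnt 0 0 l := by
    have hne : fcnt 0 0 l ≠ 0 := by
      intro h
      have h2 := (fcnt_zero_iff l 0 le_rfl).mp h
      norm_num at h2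
      rw [h2] at hbadl
      exact Bool.false_ne_true hbadl
    have := fcnt_nonneg 0 l 0
    omega
  have hA : 0 < ((pvLinesD N matrix).map (fun l => fcnt 0 0 l)).sum := by
    refine sum_pos_of_mem (List.mem_map_of_mem hl) hpos ?_
    intro y hy
    obtain ⟨l', hl', rfl⟩ := List.mem_map.mp hy
    exact fcnt_nonneg 0 l' 0
  omega
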